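-- pv_equiv track=rewrite | github.com/truecomercializadora/truecomercializadora | truecomercializadora/sistema.py | get_mercado_energia_total_dict
-- ===== SOURCE A (Python) =====
-- def get_mercado_energia_total_dict(mercado_energia_total_str: str):
--     '''
--     Retorna um objeto contendo os valores de carga, distribuidos em ano, submercado
--      e mes, do bloco Mercado de Energia Total de um sistema.dat
--
--      : mercado_energia_total_str deve ser a string obtida atraves da funcao
--       'get_mercado_energia_total()'
--     '''
--
--     if type(mercado_energia_total_str) != str:
--         raise Exception("'get_mercado_energia_total_dict' can only receive a string."
--                         "{} is not a valid input type".format(type(mercado_energia_total_str)))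
--
--     file_lines = mercado_energia_total_str.splitlines()
--
--     # Dividindo a string em submercados
--     submercados =  {
--         'SE': file_lines[4:10],
--         'S': file_lines[11:17],
--         'NE': file_lines[18:24],
--         'N': file_lines[25:31]
--     }
--
--     # Escrevendo cada submercado de forma iterativa para um dicionario
--     D = {}
--     for submercado in submercados:
--         d = {}
--         for row in submercados[submercado]:
--             values = {
--                 'jan':row[5:15].strip(),
--                 'fev':row[15:23].strip(),
--                 'mar':row[23:31].strip(),
--                 'abr':row[31:39].strip(),
--                 'mai':row[39:47].strip(),
--                 'jun':row[47:55].strip(),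
--                 'jul':row[55:63].strip(),
--                 'ago':row[63:71].strip(),
--                 'set':row[71:79].strip(),
--                 'out':row[79:87].strip(),
--                 'nov':row[87:95].strip(),
--                 'dez':row[95:].strip(),
--             }
--             d.update({row[:5].strip(): values})
--         D.update({submercado: d})
--     return D
-- ===== SOURCE B (Python) =====
-- def get_mercado_energia_total_dict(mercado_energia_total_str: str):
--     '''
--     Single-pass re-implementation: instead of slicing four fixed line blocks and
--     using a hardcoded column-boundary dict, walk the lines once, classify each
--     line index arithmetically into (submarket, row-within-block) via divmod, and
--     tokenize each row by consuming it left-to-right with a field-width list.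
--     '''
--     if type(mercado_energia_total_str) != str:
--         raise Exception("'get_mercado_energia_total_dict' can only receive a string."
--                         "{} is not a valid input type".format(type(mercado_energia_total_str)))
--
--     names = ['SE', 'S', 'NE', 'N']
--     months = ['jan', 'fev', 'mar', 'abr', 'mai', 'jun',
--               'jul', 'ago', 'set', 'out', 'nov']
--     widths = [10, 8, 8, 8, 8, 8, 8, 8, 8, 8, 8]
--
--     D = {name: {} for name in names}
--     for idx, row in enumerate(mercado_energia_total_str.splitlines()):
--         q, r = divmod(idx - 4, 7)
--         if idx < 4 or q > 3 or r > 5: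
--             continue  # header lines, gap lines between blocks, trailing lines
--         key = row[:5].strip()
--         rest = row[5:]
--         values = {}
--         for month, width in zip(months, widths):
--             values[month] = rest[:width].strip()
--             rest = rest[width:]
--         values['dez'] = rest.strip()
--         D[names[q]][key] = values
--     return D
-- ===== Notes on version B (the rewrite author's own statement) =====
-- stated objective: alternative
-- what changed: Replaces A's four hardcoded line-block slices and the 12-entry absolute-column dict literal by a single pass over the lines that classifies each line index with divmod into (submarket, row) and tokenizes each row by consuming it left-to-right with a field-width list.
import Mathlib
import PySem

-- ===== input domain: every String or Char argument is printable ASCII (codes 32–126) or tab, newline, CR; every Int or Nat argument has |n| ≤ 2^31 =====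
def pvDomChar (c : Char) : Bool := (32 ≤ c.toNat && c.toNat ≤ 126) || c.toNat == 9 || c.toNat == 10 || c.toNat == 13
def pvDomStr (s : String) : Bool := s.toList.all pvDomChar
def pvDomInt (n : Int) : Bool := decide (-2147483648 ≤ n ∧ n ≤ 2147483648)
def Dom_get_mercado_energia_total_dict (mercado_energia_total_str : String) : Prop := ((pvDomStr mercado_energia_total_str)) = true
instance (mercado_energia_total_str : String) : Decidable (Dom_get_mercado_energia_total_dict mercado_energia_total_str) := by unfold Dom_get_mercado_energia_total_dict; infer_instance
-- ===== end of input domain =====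

-- B replaces A's four hardcoded line-block slices and 12-entry absolute-column dict literal by a
-- single pass over the lines (divmod index classification) with a width-consuming row tokenizer.

-- ===== PORT A =====
-- the 12-key dict literal 'values' (distinct literal keys → its association list, in order)
def pvValuesA (row : String) : List (String × String) :=
  [ ("jan", PySem.Str.strip (PySem.Str.slice row (some 5) (some 15)))
  , ("fev", PySem.Str.strip (PySem.Str.slice row (some 15) (some 23)))
  , ("mar", PySem.Str.strip (PySem.Str.slice row (some 23) (some 31)))
  , ("abr", PySem.Str.strip (PySem.Str.slice row (some 31) (some 39)))
  , ("mai", PySem.Str.strip (PySem.Str.slice row (some 39) (some 47)))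
  , ("jun", PySem.Str.strip (PySem.Str.slice row (some 47) (some 55)))
  , ("jul", PySem.Str.strip (PySem.Str.slice row (some 55) (some 63)))
  , ("ago", PySem.Str.strip (PySem.Str.slice row (some 63) (some 71)))
  , ("set", PySem.Str.strip (PySem.Str.slice row (some 71) (some 79)))
  , ("out", PySem.Str.strip (PySem.Str.slice row (some 79) (some 87)))
  , ("nov", PySem.Str.strip (PySem.Str.slice row (some 87) (some 95)))
  , ("dez", PySem.Str.strip (PySem.Str.slice row (some 95) none)) ]

def get_mercado_energia_total_dict (mercado_energia_total_str : String) : List (String × List (String × List (String × String))) :=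
  let file_lines := PySem.Str.splitlines mercado_energia_total_str
  -- the dict literal 'submercados' (distinct literal keys → its association list)
  let submercados : List (String × List String) :=
    [ ("SE", PySem.List.slice file_lines (some 4) (some 10))
    , ("S",  PySem.List.slice file_lines (some 11) (some 17))
    , ("NE", PySem.List.slice file_lines (some 18) (some 24))
    , ("N",  PySem.List.slice file_lines (some 25) (some 31)) ]
  (submercados.foldl (fun D p =>
      let d := p.2.foldl (fun d row =>
          d.insert (PySem.Str.strip (PySem.Str.slice row none (some 5))) (pvValuesA row))
        (PySem.Dict.empty : PySem.Dict String (List (String × String)))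
      D.insert p.1 d.items)
    (PySem.Dict.empty : PySem.Dict String (List (String × List (String × String))))).items

-- ===== PORT B =====
def pvNames : List String := ["SE", "S", "NE", "N"]
def pvMonths : List String :=
  ["jan", "fev", "mar", "abr", "mai", "jun", "jul", "ago", "set", "out", "nov"]
def pvWidths : List Int := [10, 8, 8, 8, 8, 8, 8, 8, 8, 8, 8]

-- B's row tokenizer: key = row[:5], then consume row[5:] left-to-right by field widths, then 'dez'
def pvParseRowB (row : String) : String × List (String × String) :=
  let key := PySem.Str.strip (PySem.Str.slice row none (some 5))
  let st := (pvMonths.zip pvWidths).foldl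
      (fun (st : PySem.Dict String String × String) mw =>
        (st.1.insert mw.1 (PySem.Str.strip (PySem.Str.slice st.2 none (some mw.2))),
         PySem.Str.slice st.2 (some mw.2) none))
      ((PySem.Dict.empty : PySem.Dict String String), PySem.Str.slice row (some 5) none)
  (key, (st.1.insert "dez" (PySem.Str.strip st.2)).items)

-- B's loop body: divmod-classify the line index; 'continue' on header/gap/trailing lines
def pvStepB (D : PySem.Dict String (PySem.Dict String (List (String × String))))
    (p : Int × String) : PySem.Dict String (PySem.Dict String (List (String × String))) :=
  let q := PySem.Int.floordiv (p.1 - 4) 7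
  let r := PySem.Int.mod (p.1 - 4) 7
  if p.1 < 4 ∨ 3 < q ∨ 5 < r then D
  else
    match PySem.List.pyGet? pvNames q with      -- names[q]; in range by the guard (0 ≤ q ≤ 3)
    | some name =>
        let kv := pvParseRowB p.2
        D.modify name PySem.Dict.empty (fun d => d.insert kv.1 kv.2)
    | none => D

def get_mercado_energia_total_dict_alt (mercado_energia_total_str : String) : List (String × List (String × List (String × String))) :=
  let D0 : PySem.Dict String (PySem.Dict String (List (String × String))) :=
    pvNames.foldl (fun D n => D.insert n PySem.Dict.empty) PySem.Dict.empty   -- {name: {} for name in names}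
  (((PySem.List.enumerate (PySem.Str.splitlines mercado_energia_total_str) 0).foldl pvStepB D0).items).map
    (fun p => (p.1, p.2.items))

-- ===== PRECONDITION & SPEC =====
def Spec_get_mercado_energia_total_dict (mercado_energia_total_str : String) (out : List (String × List (String × List (String × String)))) : Prop := out = get_mercado_energia_total_dict_alt mercado_energia_total_str
instance (mercado_energia_total_str : String) (out : List (String × List (String × List (String × String)))) : Decidable (Spec_get_mercado_energia_total_dict mercado_energia_total_str out) := by unfold Spec_get_mercado_energia_total_dict; infer_instance

-- ===== CLAIM (what is proved, stated in full; the proofs are below) =====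
def Claim_equal_get_mercado_energia_total_dict : Prop := ∀ (mercado_energia_total_str : String), Dom_get_mercado_energia_total_dict mercado_energia_total_str → Spec_get_mercado_energia_total_dict mercado_energia_total_str (get_mercado_energia_total_dict mercado_energia_total_str)

-- ===== LEMMAS AND PROOFS =====

-- String-level slice composition (both ports slice only with nonnegative bounds)
theorem pvStrEq (s t : String) (h : s.toList = t.toList) : s = t := by
  have := congrArg String.ofList h
  simpa using this

theorem pvSliceFromFrom (s : String) (a w : Int) (ha : 0 ≤ a) (hw : 0 ≤ w) :
    PySem.Str.slice (PySem.Str.slice s (some a) none) (some w) none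
      = PySem.Str.slice s (some (a + w)) none := by
  apply pvStrEq
  simp only [PySem.Str.toList_slice, PySem.Chars.slice_eq_listSlice]
  rw [PySem.List.slice_from _ ha, PySem.List.slice_from _ hw, PySem.List.slice_from _ (by omega),
      List.drop_drop]
  congr 1
  omega

theorem pvSliceFromTo (s : String) (a w : Int) (ha : 0 ≤ a) (hw : 0 ≤ w) :
    PySem.Str.slice (PySem.Str.slice s (some a) none) none (some w)
      = PySem.Str.slice s (some a) (some (a + w)) := by
  apply pvStrEq
  simp only [PySem.Str.toList_slice, PySem.Chars.slice_eq_listSlice]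
  rw [PySem.List.slice_from _ ha, PySem.List.slice_to _ hw, PySem.List.slice_toNat _ ha (by omega)]
  congr 1
  omega

-- B's width-consuming tokenizer produces exactly A's absolute-column values
theorem pvParseRowB_eq (row : String) :
    pvParseRowB row = (PySem.Str.strip (PySem.Str.slice row none (some 5)), pvValuesA row) := by
  unfold pvParseRowB pvMonths pvWidths
  simp only [List.zip, List.zipWith, List.foldl]
  rw [pvSliceFromTo row 5 10 (by norm_num) (by norm_num)]
  rw [pvSliceFromFrom row 5 10 (by norm_num) (by norm_num)]
  norm_num
  rw [pvSliceFromTo row 15 8 (by norm_num) (by norm_num)]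
  rw [pvSliceFromFrom row 15 8 (by norm_num) (by norm_num)]
  norm_num
  rw [pvSliceFromTo row 23 8 (by norm_num) (by norm_num)]
  rw [pvSliceFromFrom row 23 8 (by norm_num) (by norm_num)]
  norm_num
  rw [pvSliceFromTo row 31 8 (by norm_num) (by norm_num)]
  rw [pvSliceFromFrom row 31 8 (by norm_num) (by norm_num)]
  norm_num
  rw [pvSliceFromTo row 39 8 (by norm_num) (by norm_num)]
  rw [pvSliceFromFrom row 39 8 (by norm_num) (by norm_num)]
  norm_num
  rw [pvSliceFromTo row 47 8 (by norm_num) (by norm_num)]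
  rw [pvSliceFromFrom row 47 8 (by norm_num) (by norm_num)]
  norm_num
  rw [pvSliceFromTo row 55 8 (by norm_num) (by norm_num)]
  rw [pvSliceFromFrom row 55 8 (by norm_num) (by norm_num)]
  norm_num
  rw [pvSliceFromTo row 63 8 (by norm_num) (by norm_num)]
  rw [pvSliceFromFrom row 63 8 (by norm_num) (by norm_num)]
  norm_num
  rw [pvSliceFromTo row 71 8 (by norm_num) (by norm_num)]
  rw [pvSliceFromFrom row 71 8 (by norm_num) (by norm_num)]
  norm_num
  rw [pvSliceFromTo row 79 8 (by norm_num) (by norm_num)]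
  rw [pvSliceFromFrom row 79 8 (by norm_num) (by norm_num)]
  norm_num
  rw [pvSliceFromTo row 87 8 (by norm_num) (by norm_num)]
  rw [pvSliceFromFrom row 87 8 (by norm_num) (by norm_num)]
  norm_num
  simp [PySem.Dict.insert, PySem.Dict.empty, PySem.Dict.contains, pvValuesA]

-- the four-slot dict D and its pointwise modifications
def pvMk4 (d0 d1 d2 d3 : PySem.Dict String (List (String × String))) :
    PySem.Dict String (PySem.Dict String (List (String × String))) :=
  PySem.Dict.mk [("SE", d0), ("S", d1), ("NE", d2), ("N", d3)]

-- A's inner-loop body (shared shape of both inner folds, via pvParseRowB_eq)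
def pvStepI (d : PySem.Dict String (List (String × String))) (row : String) :
    PySem.Dict String (List (String × String)) :=
  d.insert (pvParseRowB row).1 (pvParseRowB row).2

theorem pvModify4_0 (d0 d1 d2 d3 f) :
    (pvMk4 d0 d1 d2 d3).modify "SE" PySem.Dict.empty f = pvMk4 (f d0) d1 d2 d3 := by
  simp [pvMk4, PySem.Dict.modify, PySem.Dict.contains, PySem.Dict.getD, PySem.Dict.get?, PySem.Dict.insert]
theorem pvModify4_1 (d0 d1 d2 d3 f) :
    (pvMk4 d0 d1 d2 d3).modify "S" PySem.Dict.empty f = pvMk4 d0 (f d1) d2 d3 := by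
  simp [pvMk4, PySem.Dict.modify, PySem.Dict.contains, PySem.Dict.getD, PySem.Dict.get?, PySem.Dict.insert]
theorem pvModify4_2 (d0 d1 d2 d3 f) :
    (pvMk4 d0 d1 d2 d3).modify "NE" PySem.Dict.empty f = pvMk4 d0 d1 (f d2) d3 := by
  simp [pvMk4, PySem.Dict.modify, PySem.Dict.contains, PySem.Dict.getD, PySem.Dict.get?, PySem.Dict.insert]
theorem pvModify4_3 (d0 d1 d2 d3 f) :
    (pvMk4 d0 d1 d2 d3).modify "N" PySem.Dict.empty f = pvMk4 d0 d1 d2 (f d3) := by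
  simp [pvMk4, PySem.Dict.modify, PySem.Dict.contains, PySem.Dict.getD, PySem.Dict.get?, PySem.Dict.insert]

-- the elements of ls whose (global) index j, counting from n, satisfies a ≤ j < b
def pvSel (a b n : Nat) : List String → List String
  | [] => []
  | x :: t => (if a ≤ n ∧ n < b then [x] else []) ++ pvSel a b (n + 1) t

theorem pvSel_take_drop (a b : Nat) (ls : List String) (n : Nat) :
    pvSel a b n ls = (ls.take (b - n)).drop (a - n) := by
  induction ls generalizing n with
  | nil => simp [pvSel]
  | cons x t ih =>
    by_cases hb : n < b
    · rw [show b - n = (b - (n + 1)) + 1 by omega]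
      by_cases ha : a ≤ n
      · simp [pvSel, ha, hb, ih, show a - n = 0 by omega, show a - (n + 1) = 0 by omega]
      · simp only [pvSel, if_neg (by omega : ¬(a ≤ n ∧ n < b)), List.nil_append, ih,
          List.take_succ_cons, show a - n = (a - (n + 1)) + 1 by omega, List.drop_succ_cons]
    · simp [pvSel, show b - n = 0 by omega, show b - (n + 1) = 0 by omega, ih,
        if_neg (by omega : ¬(a ≤ n ∧ n < b))]

-- single-pass classification = the four block folds
theorem pvLoopB (ls : List String) (n : Nat) (d0 d1 d2 d3) :
    (PySem.List.enumerate ls (n : Int)).foldl pvStepB (pvMk4 d0 d1 d2 d3) =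
      pvMk4 ((pvSel 4 10 n ls).foldl pvStepI d0) ((pvSel 11 17 n ls).foldl pvStepI d1)
            ((pvSel 18 24 n ls).foldl pvStepI d2) ((pvSel 25 31 n ls).foldl pvStepI d3) := by
  induction ls generalizing n d0 d1 d2 d3 with
  | nil => simp [PySem.List.enumerate_nil, pvSel]
  | cons x t ih =>
    rw [PySem.List.enumerate_cons, List.foldl_cons,
        show ((n : Int) + 1) = ((n + 1 : Nat) : Int) by push_cast; ring]
    have hfd : PySem.Int.floordiv ((n : Int) - 4) 7 = ((n : Int) - 4) / 7 :=
      PySem.Int.floordiv_eq_ediv_of_pos (by norm_num)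
    have hmd : PySem.Int.mod ((n : Int) - 4) 7 = ((n : Int) - 4) % 7 :=
      PySem.Int.mod_eq_emod_of_pos (by norm_num)
    by_cases h0 : 4 ≤ n ∧ n < 10
    · have hstep : pvStepB (pvMk4 d0 d1 d2 d3) ((n : Int), x) = pvMk4 (pvStepI d0 x) d1 d2 d3 := by
        unfold pvStepB
        simp only [hfd, hmd]
        rw [if_neg (by omega), show ((n : Int) - 4) / 7 = 0 by omega]
        simpa [pvNames, PySem.List.pyGet?, PySem.List.pyIdx?, pvStepI] using pvModify4_0 d0 d1 d2 d3 _
      rw [hstep, ih]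
      simp [pvSel, h0, if_neg (by omega : ¬(11 ≤ n ∧ n < 17)),
        if_neg (by omega : ¬(18 ≤ n ∧ n < 24)), if_neg (by omega : ¬(25 ≤ n ∧ n < 31))]
    · by_cases h1 : 11 ≤ n ∧ n < 17
      · have hstep : pvStepB (pvMk4 d0 d1 d2 d3) ((n : Int), x) = pvMk4 d0 (pvStepI d1 x) d2 d3 := by
          unfold pvStepB
          simp only [hfd, hmd]
          rw [if_neg (by omega), show ((n : Int) - 4) / 7 = 1 by omega]
          simpa [pvNames, PySem.List.pyGet?, PySem.List.pyIdx?, pvStepI] using pvModify4_1 d0 d1 d2 d3 _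
        rw [hstep, ih]
        simp [pvSel, h1, if_neg (by omega : ¬(4 ≤ n ∧ n < 10)),
          if_neg (by omega : ¬(18 ≤ n ∧ n < 24)), if_neg (by omega : ¬(25 ≤ n ∧ n < 31))]
      · by_cases h2 : 18 ≤ n ∧ n < 24
        · have hstep : pvStepB (pvMk4 d0 d1 d2 d3) ((n : Int), x) = pvMk4 d0 d1 (pvStepI d2 x) d3 := by
            unfold pvStepB
            simp only [hfd, hmd]
            rw [if_neg (by omega), show ((n : Int) - 4) / 7 = 2 by omega]
            simpa [pvNames, PySem.List.pyGet?, PySem.List.pyIdx?, pvStepI] using pvModify4_2 d0 d1 d2 d3 _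
          rw [hstep, ih]
          simp [pvSel, h2, if_neg (by omega : ¬(4 ≤ n ∧ n < 10)),
            if_neg (by omega : ¬(11 ≤ n ∧ n < 17)), if_neg (by omega : ¬(25 ≤ n ∧ n < 31))]
        · by_cases h3 : 25 ≤ n ∧ n < 31
          · have hstep : pvStepB (pvMk4 d0 d1 d2 d3) ((n : Int), x) = pvMk4 d0 d1 d2 (pvStepI d3 x) := by
              unfold pvStepB
              simp only [hfd, hmd]
              rw [if_neg (by omega), show ((n : Int) - 4) / 7 = 3 by omega]
              simpa [pvNames, PySem.List.pyGet?, PySem.List.pyIdx?, pvStepI] using pvModify4_3 d0 d1 d2 d3 _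
            rw [hstep, ih]
            simp [pvSel, h3, if_neg (by omega : ¬(4 ≤ n ∧ n < 10)),
              if_neg (by omega : ¬(11 ≤ n ∧ n < 17)), if_neg (by omega : ¬(18 ≤ n ∧ n < 24))]
          · have hstep : pvStepB (pvMk4 d0 d1 d2 d3) ((n : Int), x) = pvMk4 d0 d1 d2 d3 := by
              unfold pvStepB
              simp only [hfd, hmd]
              rw [if_pos (by omega)]
            rw [hstep, ih]
            simp [pvSel, if_neg (by omega : ¬(4 ≤ n ∧ n < 10)),
              if_neg (by omega : ¬(11 ≤ n ∧ n < 17)), if_neg (by omega : ¬(18 ≤ n ∧ n < 24)),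
              if_neg (by omega : ¬(25 ≤ n ∧ n < 31))]

-- B's inner-loop body is A's inner-loop body
theorem pvStepI_eq : pvStepI = fun d row =>
    d.insert (PySem.Str.strip (PySem.Str.slice row none (some 5))) (pvValuesA row) := by
  funext d row
  simp [pvStepI, pvParseRowB_eq]

-- ===== VERDICT (by name: the statement is the Claim_ definition above) =====
theorem get_mercado_energia_total_dict_spec : Claim_equal_get_mercado_energia_total_dict := by
  intro s _
  show get_mercado_energia_total_dict s = get_mercado_energia_total_dict_alt s
  unfold get_mercado_energia_total_dict get_mercado_energia_total_dict_alt
  simp only []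
  have hD0 : pvNames.foldl (fun D n => D.insert n PySem.Dict.empty)
      (PySem.Dict.empty : PySem.Dict String (PySem.Dict String (List (String × String)))) =
      pvMk4 PySem.Dict.empty PySem.Dict.empty PySem.Dict.empty PySem.Dict.empty := by
    decide
  rw [hD0, show (0 : Int) = ((0 : Nat) : Int) by norm_num, pvLoopB]
  simp only [pvSel_take_drop, Nat.sub_zero]
  rw [PySem.List.slice_toNat _ (by norm_num : (0:Int) ≤ 4) (by norm_num : (0:Int) ≤ 10),
      PySem.List.slice_toNat _ (by norm_num : (0:Int) ≤ 11) (by norm_num : (0:Int) ≤ 17),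
      PySem.List.slice_toNat _ (by norm_num : (0:Int) ≤ 18) (by norm_num : (0:Int) ≤ 24),
      PySem.List.slice_toNat _ (by norm_num : (0:Int) ≤ 25) (by norm_num : (0:Int) ≤ 31)]
  simp only [pvStepI_eq]
  simp [pvMk4, List.drop_take, PySem.Dict.insert, PySem.Dict.empty, PySem.Dict.contains,
    List.foldl]
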